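-- pv_equiv track=rewrite | github.com/Ringhu/LCTSCap | scripts/preprocess.py | assign_splits_to_manifest
-- ===== SOURCE A (Python) =====
-- def assign_splits_to_manifest(manifest, splits):
--     """Annotate each window in manifest with its split assignment."""
--     pid_to_split = {}
--     for split_name, pids in splits.items():
--         for pid in pids:
--             pid_to_split[pid] = split_name
--     for entry in manifest:
--         entry["split"] = pid_to_split.get(entry["participant_id"], "train")
--     return manifest
-- ===== SOURCE B (Python) =====
-- def assign_splits_to_manifest(manifest, splits):
--     """Annotate each window in manifest with its split assignment."""
--     for entry in manifest:
--         pid = entry["participant_id"]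
--         label = "train"
--         for split_name, pids in splits.items():
--             if pid in pids:
--                 label = split_name
--         entry["split"] = label
--     return manifest
-- ===== Notes on version B (the rewrite author's own statement) =====
-- stated objective: simpler
-- what changed: Drops the pre-built pid-to-split dict: each entry scans splits.items() directly (no break, so a later split's membership wins, matching A's dict last-write) with the label initialized to 'train'.
import Mathlib
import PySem

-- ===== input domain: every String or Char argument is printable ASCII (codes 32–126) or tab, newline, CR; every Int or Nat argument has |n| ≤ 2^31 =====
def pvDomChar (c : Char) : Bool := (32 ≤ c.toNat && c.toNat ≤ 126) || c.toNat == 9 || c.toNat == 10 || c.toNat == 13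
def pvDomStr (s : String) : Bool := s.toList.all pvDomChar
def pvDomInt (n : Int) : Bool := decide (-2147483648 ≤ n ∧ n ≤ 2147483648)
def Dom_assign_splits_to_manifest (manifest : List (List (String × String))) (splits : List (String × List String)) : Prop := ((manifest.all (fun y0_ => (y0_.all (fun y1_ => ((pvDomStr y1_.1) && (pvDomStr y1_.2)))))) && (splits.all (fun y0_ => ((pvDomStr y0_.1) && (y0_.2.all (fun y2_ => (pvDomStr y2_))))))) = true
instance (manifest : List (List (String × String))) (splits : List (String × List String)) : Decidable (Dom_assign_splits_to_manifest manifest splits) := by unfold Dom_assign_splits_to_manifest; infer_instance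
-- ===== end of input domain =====

-- ===== PORT A =====
-- A builds a pid -> split dict (last write wins), then sets each entry's "split" key.
def assign_splits_to_manifest (manifest : List (List (String × String))) (splits : List (String × List String)) : List (List (String × String)) :=
  let pid_to_split : PySem.Dict String String :=
    splits.foldl (fun d p => p.2.foldl (fun d pid => d.insert pid p.1) d) PySem.Dict.empty
  manifest.map (fun entry =>
    let e := PySem.Dict.ofList entry
    (e.insert "split" (pid_to_split.getD (e.getD "participant_id" "") "train")).items)

-- ===== PORT B =====
-- B: no dict; per entry, scan splits with no break (last match wins), default "train".
def assign_splits_to_manifest_alt (manifest : List (List (String × String))) (splits : List (String × List String)) : List (List (String × String)) :=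
  manifest.map (fun entry =>
    let e := PySem.Dict.ofList entry
    let pid := e.getD "participant_id" ""
    let label := splits.foldl (fun lab p => if pid ∈ p.2 then p.1 else lab) "train"
    (e.insert "split" label).items)

-- ===== PRECONDITION & SPEC =====
-- Pre_ excludes entries lacking a "participant_id" key, on which Python A raises KeyError.
def Pre_assign_splits_to_manifest (manifest : List (List (String × String))) (splits : List (String × List String)) : Prop :=
  (manifest.all (fun entry => entry.any (fun p => p.1 == "participant_id"))) = true
instance (manifest : List (List (String × String))) (splits : List (String × List String)) : Decidable (Pre_assign_splits_to_manifest manifest splits) := by unfold Pre_assign_splits_to_manifest; infer_instance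
def pvWitness_assign_splits_to_manifest : (List (List (String × String))) × (List (String × List String)) :=
  ([[("participant_id", "a"), ("w", "0")], [("participant_id", "b")]], [("val", ["b"]), ("test", ["a", "b"])])
def Spec_assign_splits_to_manifest (manifest : List (List (String × String))) (splits : List (String × List String)) (out : List (List (String × String))) : Prop := out = assign_splits_to_manifest_alt manifest splits
instance (manifest : List (List (String × String))) (splits : List (String × List String)) (out : List (List (String × String))) : Decidable (Spec_assign_splits_to_manifest manifest splits out) := by unfold Spec_assign_splits_to_manifest; infer_instance

-- ===== CLAIM (what is proved, stated in full; the proofs are below) =====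
def Claim_equal_assign_splits_to_manifest : Prop := ∀ (manifest : List (List (String × String))) (splits : List (String × List String)), Dom_assign_splits_to_manifest manifest splits → Pre_assign_splits_to_manifest manifest splits → Spec_assign_splits_to_manifest manifest splits (assign_splits_to_manifest manifest splits)

-- ===== LEMMAS AND PROOFS =====
-- an insert loop over pids with one value behaves as a membership test
theorem getD_foldl_insert_const (pids : List String) (name : String) (d : PySem.Dict String String) (pid dv : String) :
    (pids.foldl (fun d q => d.insert q name) d).getD pid dv
      = if pid ∈ pids then name else d.getD pid dv := by
  induction pids generalizing d with
  | nil => simp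
  | cons q pids ih =>
      simp only [List.foldl_cons, ih, PySem.Dict.getD_insert, List.mem_cons]
      by_cases h1 : pid ∈ pids <;> by_cases h2 : pid = q <;> simp [h1, h2]

-- the dict built by A answers exactly what B's scan computes
theorem getD_build_eq_scan (splits : List (String × List String)) (d : PySem.Dict String String) (pid : String) :
    (splits.foldl (fun d p => p.2.foldl (fun d q => d.insert q p.1) d) d).getD pid "train"
      = splits.foldl (fun lab p => if pid ∈ p.2 then p.1 else lab) (d.getD pid "train") := by
  induction splits generalizing d with
  | nil => rfl
  | cons p splits ih =>
      simp only [List.foldl_cons, ih, getD_foldl_insert_const]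

-- ===== VERDICT (by name: the statement is the Claim_ definition above) =====
theorem assign_splits_to_manifest_spec : Claim_equal_assign_splits_to_manifest := by
  intro manifest splits _ _
  unfold Spec_assign_splits_to_manifest assign_splits_to_manifest assign_splits_to_manifest_alt
  simp only [getD_build_eq_scan, PySem.Dict.getD_empty]
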